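-- pv_equiv track=rewrite | github.com/chadireoroonu/TIL | homework/homework_python_05_hw02_P.py | is_selfnumber
-- ===== SOURCE A (Python) =====
-- def fn_d(n):
--     num = [n] # 합산할 숫자들을 모을 리스트 생성, n도 더해야하므로 리스트에 추가
--     while n != 0: # n을 10으로 나눈 몫이 0이 될때까지 각 몫을 n으로 설정
--         n // 10
--         num.append(n % 10) # 리스트에는 n을 10으로 나눈 나머지 추가
--         n = n // 10
--     return sum(num) # 각 리스트의 합을 구해 n과 각 자릿수 합산
--
-- def is_selfnumber(n):
--     i = 1
--     generator = []
--     while i < n: # i가 n보다 작은 동안 제너레이터 리스트에 fn_d(i) 추가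
--         generator.append(fn_d(i))
--         i += 1
--     if n in generator: # 만약 리스트에 n이 있다면, 셀프넘버가 아님
--         return (f'{n} is not self number')
--     else: # 만약 리스트에 n이 없다면, 셀프넘버에 해당함
--         return (f'{n} is self number')
-- ===== SOURCE B (Python) =====
-- def is_selfnumber(n):
--     # count the decimal digits of n
--     d, m = 0, n
--     while m > 0:
--         d += 1
--         m //= 10
--     # any generator i of n satisfies n - 9*d <= i < n
--     for i in range(max(1, n - 9 * d), n):
--         m, s = i, 0
--         while m:
--             s += m % 10
--             m //= 10
--         if i + s == n:
--             return f'{n} is not self number'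
--     return f'{n} is self number'
-- ===== Notes on version B (the rewrite author's own statement) =====
-- stated objective: faster
-- what changed: Instead of materialising fn_d(i) for every i from 1 to n-1 and testing membership, B scans only the O(log n) candidate generators i in [n - 9*digits(n), n-1], since a generator of n can differ from n by at most 9 per digit.
import Mathlib
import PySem

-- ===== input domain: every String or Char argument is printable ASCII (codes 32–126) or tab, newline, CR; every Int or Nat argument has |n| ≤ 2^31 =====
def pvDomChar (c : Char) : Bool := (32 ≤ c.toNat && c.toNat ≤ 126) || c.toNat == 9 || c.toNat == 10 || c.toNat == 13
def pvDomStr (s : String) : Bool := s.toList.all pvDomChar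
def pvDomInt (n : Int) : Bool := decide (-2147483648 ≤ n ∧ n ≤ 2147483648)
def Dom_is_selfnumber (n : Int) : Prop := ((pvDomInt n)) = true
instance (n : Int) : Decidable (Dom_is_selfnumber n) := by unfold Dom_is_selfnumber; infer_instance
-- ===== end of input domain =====

-- B replaces A's scan of all i < n by a scan of the O(log n) window [n - 9*digits(n), n-1]
-- that must contain any generator of n; objective: faster (asymptotic).

-- ===== PORT A =====
-- fn_d's while loop on the nonnegative part of n (A only ever calls fn_d with n ≥ 1;
-- on that domain the Nat recursion is exact: while n != 0: append n % 10; n //= 10).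
def pvFnDLoop : Nat → List Int → List Int
  | 0, acc => acc
  | m + 1, acc => pvFnDLoop ((m + 1) / 10) (acc ++ [(((m + 1) % 10 : Nat) : Int)])
  decreasing_by exact Nat.div_lt_self (Nat.succ_pos m) (by norm_num)

def pvFnD (n : Int) : Int := (pvFnDLoop n.toNat [n]).sum

-- while i < n: generator.append(fn_d(i)); i += 1
def pvGenLoop (n i : Int) (acc : List Int) : List Int :=
  if i < n then pvGenLoop n (i + 1) (acc ++ [pvFnD i]) else acc
  termination_by (n - i).toNat
  decreasing_by omega

def is_selfnumber (n : Int) : String :=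
  if n ∈ pvGenLoop n 1 [] then PySem.Int.toStr n ++ " is not self number"
  else PySem.Int.toStr n ++ " is self number"

-- ===== PORT B =====
-- d, m = 0, n; while m > 0: d += 1; m //= 10
def pvCountLoop (d m : Int) : Int :=
  if 0 < m then pvCountLoop (d + 1) (PySem.Int.floordiv m 10) else d
  termination_by m.toNat
  decreasing_by
    simp only [PySem.Int.floordiv_eq_ediv_of_pos (by norm_num : (0:Int) < 10)]; omega

-- m, s = i, 0; while m: s += m % 10; m //= 10 — on the nonnegative part of i
-- (B only runs this with i ≥ 1; on that domain the Nat recursion is exact).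
def pvDigitSum : Nat → Nat
  | 0 => 0
  | m + 1 => (m + 1) % 10 + pvDigitSum ((m + 1) / 10)
  decreasing_by exact Nat.div_lt_self (Nat.succ_pos m) (by norm_num)

-- for i in range(lo, n): … if i + s == n: return not-self; after the loop: self
def pvAltLoop (n i : Int) : String :=
  if i < n then
    if i + (pvDigitSum i.toNat : Int) = n then PySem.Int.toStr n ++ " is not self number"
    else pvAltLoop n (i + 1)
  else PySem.Int.toStr n ++ " is self number"
  termination_by (n - i).toNat
  decreasing_by omega

def is_selfnumber_alt (n : Int) : String :=
  pvAltLoop n (max 1 (n - 9 * pvCountLoop 0 n))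

-- ===== PRECONDITION & SPEC =====
def Spec_is_selfnumber (n : Int) (out : String) : Prop := out = is_selfnumber_alt n
instance (n : Int) (out : String) : Decidable (Spec_is_selfnumber n out) := by unfold Spec_is_selfnumber; infer_instance

-- ===== CLAIM (what is proved, stated in full; the proofs are below) =====
def Claim_equal_is_selfnumber : Prop := ∀ (n : Int), Dom_is_selfnumber n → Spec_is_selfnumber n (is_selfnumber n)

-- ===== LEMMAS AND PROOFS =====

lemma pvFnDLoop_sum : ∀ (m : Nat) (acc : List Int), (pvFnDLoop m acc).sum = acc.sum + (pvDigitSum m : Int) := by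
  intro m
  induction m using Nat.strong_induction_on with
  | _ m ih =>
    intro acc
    match m with
    | 0 => simp [pvFnDLoop, pvDigitSum]
    | k + 1 =>
      rw [pvFnDLoop, pvDigitSum, ih ((k + 1) / 10) (Nat.div_lt_self (Nat.succ_pos k) (by norm_num))]
      simp; ring

lemma pvFnD_eq (i : Int) : pvFnD i = i + (pvDigitSum i.toNat : Int) := by
  simp [pvFnD, pvFnDLoop_sum]

lemma pvGenLoop_mem : ∀ (n i : Int) (acc : List Int) (x : Int),
    x ∈ pvGenLoop n i acc ↔ x ∈ acc ∨ ∃ j, i ≤ j ∧ j < n ∧ pvFnD j = x := by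
  intro n i acc x
  by_cases h : i < n
  · rw [pvGenLoop]
    simp only [h, if_true]
    rw [pvGenLoop_mem n (i + 1)]
    simp only [List.mem_append, List.mem_singleton]
    constructor
    · rintro ((ha | he) | ⟨j, hj1, hj2, hj3⟩)
      · exact Or.inl ha
      · exact Or.inr ⟨i, le_refl i, h, he.symm⟩
      · exact Or.inr ⟨j, by omega, hj2, hj3⟩
    · rintro (ha | ⟨j, hj1, hj2, hj3⟩)
      · exact Or.inl (Or.inl ha)
      · by_cases hji : j = i
        · exact Or.inl (Or.inr (by rw [← hji, hj3]))
        · exact Or.inr ⟨j, by omega, hj2, hj3⟩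
  · rw [pvGenLoop]
    simp only [h, if_false]
    constructor
    · exact Or.inl
    · rintro (ha | ⟨j, hj1, hj2, _⟩)
      · exact ha
      · omega
  termination_by n i _ _ => (n - i).toNat
  decreasing_by omega

lemma pvAltLoop_of_ex : ∀ (n i : Int),
    (∃ j, i ≤ j ∧ j < n ∧ j + (pvDigitSum j.toNat : Int) = n) →
    pvAltLoop n i = PySem.Int.toStr n ++ " is not self number" := by
  intro n i h
  obtain ⟨j, hj1, hj2, hj3⟩ := h
  have hi : i < n := by omega
  rw [pvAltLoop]
  simp only [hi, if_true]
  by_cases he : i + (pvDigitSum i.toNat : Int) = n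
  · simp [he]
  · simp only [he, if_false]
    have hji : j ≠ i := fun hji => he (by rw [← hji]; exact hj3)
    apply pvAltLoop_of_ex n (i + 1)
    exact ⟨j, by omega, hj2, hj3⟩
  termination_by n i _ => (n - i).toNat
  decreasing_by omega

lemma pvAltLoop_of_nex : ∀ (n i : Int),
    (¬ ∃ j, i ≤ j ∧ j < n ∧ j + (pvDigitSum j.toNat : Int) = n) →
    pvAltLoop n i = PySem.Int.toStr n ++ " is self number" := by
  intro n i h
  rw [pvAltLoop]
  by_cases hi : i < n
  · simp only [hi, if_true]
    have he : ¬ (i + (pvDigitSum i.toNat : Int) = n) := fun he => h ⟨i, le_refl i, hi, he⟩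
    simp only [he, if_false]
    exact pvAltLoop_of_nex n (i + 1) (fun ⟨j, hj1, hj2, hj3⟩ => h ⟨j, by omega, hj2, hj3⟩)
  · simp [hi]
  termination_by n i _ => (n - i).toNat
  decreasing_by omega

-- number of decimal digits counted by B's first loop, on the Nat side
def pvCountN : Nat → Nat
  | 0 => 0
  | m + 1 => pvCountN ((m + 1) / 10) + 1
  decreasing_by exact Nat.div_lt_self (Nat.succ_pos m) (by norm_num)

lemma pvCountLoop_eq : ∀ (m : Nat) (d : Int), pvCountLoop d (m : Int) = d + (pvCountN m : Int) := by
  intro m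
  induction m using Nat.strong_induction_on with
  | _ m ih =>
    intro d
    match m with
    | 0 => rw [pvCountLoop]; simp [pvCountN]
    | k + 1 =>
      rw [pvCountLoop]
      simp only [show (0:Int) < ((k:Nat) + 1 : Nat) from by exact_mod_cast Nat.succ_pos k, if_true]
      rw [show PySem.Int.floordiv (((k + 1 : Nat)) : Int) 10 = (((k + 1) / 10 : Nat) : Int) from by
        exact_mod_cast PySem.Int.floordiv_natCast (k + 1) 10]
      rw [ih ((k + 1) / 10) (Nat.div_lt_self (Nat.succ_pos k) (by norm_num))]
      rw [pvCountN]
      push_cast; ring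

lemma lt_ten_pow_count : ∀ (m : Nat), m < 10 ^ pvCountN m := by
  intro m
  induction m using Nat.strong_induction_on with
  | _ m ih =>
    match m with
    | 0 => simp [pvCountN]
    | k + 1 =>
      rw [pvCountN]
      have := ih ((k + 1) / 10) (Nat.div_lt_self (Nat.succ_pos k) (by norm_num))
      have hp := Nat.pow_succ 10 (pvCountN ((k + 1) / 10))
      omega

lemma pvDigitSum_le : ∀ (d m : Nat), m < 10 ^ d → pvDigitSum m ≤ 9 * d := by
  intro d
  induction d with
  | zero => intro m hm; interval_cases m; simp [pvDigitSum]
  | succ d ih =>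
    intro m hm
    match m with
    | 0 => simp [pvDigitSum]
    | k + 1 =>
      rw [pvDigitSum]
      have h1 : (k + 1) / 10 < 10 ^ d := by
        have := Nat.pow_succ 10 d
        omega
      have := ih ((k + 1) / 10) h1
      omega

-- ===== VERDICT (by name: the statement is the Claim_ definition above) =====
theorem is_selfnumber_spec : Claim_equal_is_selfnumber := by
  intro n _
  unfold Spec_is_selfnumber is_selfnumber is_selfnumber_alt
  by_cases hP : ∃ j : Int, 1 ≤ j ∧ j < n ∧ j + (pvDigitSum j.toNat : Int) = n
  · obtain ⟨j, hj1, hj2, hj3⟩ := hP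
    have hmem : n ∈ pvGenLoop n 1 [] := by
      rw [pvGenLoop_mem]
      exact Or.inr ⟨j, hj1, hj2, by rw [pvFnD_eq]; exact hj3⟩
    rw [if_pos hmem]
    have hcount : pvCountLoop 0 n = (pvCountN n.toNat : Int) := by
      conv_lhs => rw [← Int.toNat_of_nonneg (show (0:Int) ≤ n by omega)]
      rw [pvCountLoop_eq]; ring
    have hlt : j.toNat < 10 ^ pvCountN n.toNat :=
      Nat.lt_trans (by omega) (lt_ten_pow_count n.toNat)
    have hds : (pvDigitSum j.toNat : Int) ≤ 9 * (pvCountN n.toNat : Int) := by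
      exact_mod_cast pvDigitSum_le (pvCountN n.toNat) j.toNat hlt
    rw [pvAltLoop_of_ex n (max 1 (n - 9 * pvCountLoop 0 n))
      ⟨j, by rw [hcount]; simp only [max_le_iff]; omega, hj2, hj3⟩]
  · have hmem : n ∉ pvGenLoop n 1 [] := by
      rw [pvGenLoop_mem]
      rintro (ha | ⟨j, hj1, hj2, hj3⟩)
      · simp at ha
      · exact hP ⟨j, hj1, hj2, by rw [pvFnD_eq] at hj3; exact hj3⟩
    rw [if_neg hmem, pvAltLoop_of_nex]
    rintro ⟨j, hj1, hj2, hj3⟩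
    have hlo := le_max_left 1 (n - 9 * pvCountLoop 0 n)
    exact hP ⟨j, by omega, hj2, hj3⟩
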